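-- pv_equiv track=rewrite | github.com/Runarok/GeeksForGeeks-solutions | Difficulty: Easy/A New Year Game/a-new-year-game.py | minimumChocolates
-- ===== SOURCE A (Python) =====
-- def minimumChocolates(arr, N):
--     # Initialize the total chocolates to be given (ans) and the remaining chocolates (rem)
--     ans = 0
--     rem = 0
--
--     # Loop through the array of elements (arr) to calculate the minimum chocolates
--     for i in range(N):
--         el = arr[i]  # Get the current element
--
--         # If the current element is greater than the remaining chocolates to be given
--         if el > rem:
--             temp = el - rem  # Calculate how many more chocolates are needed
--             ans += temp      # Add this amount to the total chocolates
--             rem += temp      # Update the remaining chocolates to the current count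
--
--         # Decrease the remaining chocolates for the next iteration
--         rem -= 1
--
--     # Return the total chocolates needed
--     return ans
-- ===== SOURCE B (Python) =====
-- def minimumChocolates(arr, N):
--     # closed-form reduction: answer = max(0, max over i<N of arr[i] + i)
--     best = 0
--     for i in range(N):
--         best = max(best, arr[i] + i)
--     return best
-- ===== Notes on version B (the rewrite author's own statement) =====
-- stated objective: simpler
-- what changed: Replaces the stateful ans/rem loop with a single max-reduction best = max(0, max_i (arr[i]+i)), derived from the loop invariant rem = ans - i.
import Mathlib
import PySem

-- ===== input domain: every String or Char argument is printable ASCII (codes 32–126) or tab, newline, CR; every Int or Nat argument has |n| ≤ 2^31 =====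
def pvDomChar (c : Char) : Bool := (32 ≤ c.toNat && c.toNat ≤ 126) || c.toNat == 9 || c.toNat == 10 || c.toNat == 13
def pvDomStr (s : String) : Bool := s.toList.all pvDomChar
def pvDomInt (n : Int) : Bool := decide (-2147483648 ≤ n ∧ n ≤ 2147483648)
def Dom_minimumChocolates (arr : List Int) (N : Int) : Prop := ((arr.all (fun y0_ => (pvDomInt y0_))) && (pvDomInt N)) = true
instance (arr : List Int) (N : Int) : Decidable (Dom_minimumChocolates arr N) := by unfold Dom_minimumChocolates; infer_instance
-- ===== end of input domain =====

-- B replaces A's stateful ans/rem loop by a single max-reduction max(0, max_i (arr[i]+i)) (objective: simpler).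


-- ===== PORT A =====
-- one loop step of A: state (ans, rem); arr[i] ported via pyGetD (Pre_ keeps every index in range)
def pvStepA (arr : List Int) (p : Int × Int) (i : Int) : Int × Int :=
  let el := PySem.List.pyGetD arr i 0
  let p' := if el > p.2 then (p.1 + (el - p.2), p.2 + (el - p.2)) else p
  (p'.1, p'.2 - 1)

def minimumChocolates (arr : List Int) (N : Int) : Int :=
  ((PySem.List.pyRange 0 N 1).foldl (pvStepA arr) (0, 0)).1

-- ===== PORT B =====
def minimumChocolates_alt (arr : List Int) (N : Int) : Int :=
  (PySem.List.pyRange 0 N 1).foldl (fun best i => max best (PySem.List.pyGetD arr i 0 + i)) 0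

-- ===== PRECONDITION & SPEC =====
-- Pre_ excludes N > len(arr), on which Python A raises IndexError.
def Pre_minimumChocolates (arr : List Int) (N : Int) : Prop := N ≤ (arr.length : Int)
instance (arr : List Int) (N : Int) : Decidable (Pre_minimumChocolates arr N) := by unfold Pre_minimumChocolates; infer_instance
def pvWitness_minimumChocolates : List Int × Int := ([3, 1, 2], 3)

def Spec_minimumChocolates (arr : List Int) (N : Int) (out : Int) : Prop := out = minimumChocolates_alt arr N
instance (arr : List Int) (N : Int) (out : Int) : Decidable (Spec_minimumChocolates arr N out) := by unfold Spec_minimumChocolates; infer_instance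

-- ===== CLAIM (what is proved, stated in full; the proofs are below) =====
def Claim_equal_minimumChocolates : Prop := ∀ (arr : List Int) (N : Int), Dom_minimumChocolates arr N → Pre_minimumChocolates arr N → Spec_minimumChocolates arr N (minimumChocolates arr N)

-- ===== LEMMAS AND PROOFS =====

-- loop invariant: after processing indices 0..n-1, A's state is (best, best - n)
-- where best is B's fold value over the same range.
theorem pvKey (arr : List Int) (n : Nat) :
    (PySem.List.pyRange 0 (n : Int) 1).foldl (pvStepA arr) (0, 0) =
      ((PySem.List.pyRange 0 (n : Int) 1).foldl
        (fun best i => max best (PySem.List.pyGetD arr i 0 + i)) 0,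
       (PySem.List.pyRange 0 (n : Int) 1).foldl
        (fun best i => max best (PySem.List.pyGetD arr i 0 + i)) 0 - n) := by
  induction n with
  | zero => simp [PySem.List.pyRange_one_eq_nil]
  | succ n ih =>
    rw [show (((n + 1 : Nat)) : Int) = ((n : Int) + 1) by push_cast; ring,
        PySem.List.pyRange_one_succ_right (by positivity)]
    simp only [List.foldl_append, List.foldl_cons, List.foldl_nil, ih]
    set B := (PySem.List.pyRange 0 (n : Int) 1).foldl
      (fun best i => max best (PySem.List.pyGetD arr i 0 + i)) 0 with hB
    simp only [pvStepA]
    simp only [Prod.mk.injEq, max_def]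
    split_ifs with hcond h2 h2 <;> constructor <;> omega

theorem pvEq (arr : List Int) (N : Int) :
    minimumChocolates arr N = minimumChocolates_alt arr N := by
  by_cases h : 0 ≤ N
  · have : N = ((N.toNat : Nat) : Int) := by omega
    rw [minimumChocolates, minimumChocolates_alt, this, pvKey]
  · rw [minimumChocolates, minimumChocolates_alt,
        PySem.List.pyRange_one_eq_nil (by omega)]
    simp

-- ===== VERDICT (by name: the statement is the Claim_ definition above) =====
theorem minimumChocolates_spec : Claim_equal_minimumChocolates := by
  intro arr N _ _
  exact pvEq arr N
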